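-- pv_equiv track=rewrite | github.com/org404/pyrum-scripts | connect.py | generator_names
-- ===== SOURCE A (Python) =====
-- import string
--
-- def generator_names(n: int = None, names: list = None):
--     if names:
--         for name in names:
--             yield name
--     elif n > 0:
--         for each in range(n):
--             # generating names like: a, b, c ... z, aa, ab ... zz, aaa ...   etc
--             name = ""
--             for n_chars in range((each // len(string.ascii_lowercase)) + 1):
--                 name += string.ascii_lowercase[each % len(string.ascii_lowercase)]
--             yield name
-- ===== SOURCE B (Python) =====
-- import string
--
--
-- def generator_names(n: int = None, names: list = None):
--     if names:
--         for name in names: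
--             yield name
--     elif n > 0:
--         count = 0
--         length = 1
--         while count < n:
--             for letter in string.ascii_lowercase:
--                 yield letter * length
--                 count += 1
--                 if count >= n:
--                     break
--             length += 1
-- ===== Notes on version B (the rewrite author's own statement) =====
-- stated objective: alternative
-- what changed: B generates the repeated-letter names group by group with a nested loop over lengths and the alphabet (breaking at n), instead of A's per-item each//26 / each%26 arithmetic and a character-appending inner loop.
import Mathlib
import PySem

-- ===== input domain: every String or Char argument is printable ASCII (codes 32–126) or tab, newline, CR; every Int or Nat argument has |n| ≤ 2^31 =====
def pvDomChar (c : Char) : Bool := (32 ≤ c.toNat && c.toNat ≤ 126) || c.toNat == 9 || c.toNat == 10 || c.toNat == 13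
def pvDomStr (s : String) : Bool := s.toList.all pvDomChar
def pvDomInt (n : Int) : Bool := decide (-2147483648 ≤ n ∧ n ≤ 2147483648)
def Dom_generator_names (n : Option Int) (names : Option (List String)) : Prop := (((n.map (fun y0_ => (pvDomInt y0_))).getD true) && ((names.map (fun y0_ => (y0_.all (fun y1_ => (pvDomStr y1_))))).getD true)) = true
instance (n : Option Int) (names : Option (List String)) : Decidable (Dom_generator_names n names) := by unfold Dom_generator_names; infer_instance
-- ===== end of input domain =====

-- B generates the repeated-letter names group by group (nested loop over lengths and the
-- alphabet, breaking at n) instead of A's per-item each//26 / each%26 arithmetic; same cost.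
-- Both are generators; the ports return the list of yielded values.

-- ===== PORT A =====
def pvAsciiLower : List Char := "abcdefghijklmnopqrstuvwxyz".toList

-- body of A's `for each in range(n)` loop: builds `name` by repeated appending.
-- the indices into pvAsciiLower are always in range (0 ≤ each % 26 < 26), so the
-- pyGetD default 'a' is never used.
def pvA_name (each : Int) : String :=
  String.ofList ((PySem.List.pyRange 0 (PySem.Int.floordiv each (pvAsciiLower.length : Int) + 1) 1).foldl
    (fun name _ => name ++ [PySem.List.pyGetD pvAsciiLower (PySem.Int.mod each (pvAsciiLower.length : Int)) 'a']) [])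

-- `elif n > 0:` branch of A. `n = none` raises TypeError in Python (`None > 0`): excluded by Pre_.
def pvA_elif (n : Option Int) : List String :=
  match n with
  | none => []
  | some v => if 0 < v then (PySem.List.pyRange 0 v 1).map pvA_name else []

def generator_names (n : Option Int) (names : Option (List String)) : List String :=
  match names with
  | some l => if l.isEmpty then pvA_elif n else l
  | none => pvA_elif n

-- ===== PORT B =====
-- inner `for letter in string.ascii_lowercase` loop of Source B: yields letter * length,
-- increments count, breaks once count ≥ n; returns (yields, final count).
def pvB_inner : List Char → Int → Int → Nat → List String × Int
  | [], count, _, _ => ([], count)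
  | c :: rest, count, n, len =>
    let y := String.ofList (List.replicate len c)
    let count' := count + 1
    if n ≤ count' then ([y], count')
    else
      let r := pvB_inner rest count' n len
      (y :: r.1, r.2)

theorem pvB_inner_le (cs : List Char) (count n : Int) (len : Nat) :
    count ≤ (pvB_inner cs count n len).2 := by
  induction cs generalizing count with
  | nil => simp [pvB_inner]
  | cons c rest ih =>
    simp only [pvB_inner]
    split
    · dsimp only; omega
    · have := ih (count + 1)
      dsimp only
      omega

theorem pvB_inner_lt (cs : List Char) (hcs : cs ≠ []) (count n : Int) (len : Nat) :
    count < (pvB_inner cs count n len).2 := by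
  cases cs with
  | nil => exact absurd rfl hcs
  | cons c rest =>
    simp only [pvB_inner]
    split
    · dsimp only; omega
    · have := pvB_inner_le rest (count + 1) n len
      dsimp only
      omega

-- outer `while count < n` loop of Source B
def pvB_outer (len : Nat) (count n : Int) : List String :=
  if _h : count < n then
    let r := pvB_inner pvAsciiLower count n len
    r.1 ++ pvB_outer (len + 1) r.2 n
  else []
termination_by (n - count).toNat
decreasing_by
  have := pvB_inner_lt pvAsciiLower (by decide) count n len
  omega

-- `elif n > 0:` branch of Source B; `n = none` raises TypeError, excluded by Pre_.
def pvB_elif (n : Option Int) : List String :=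
  match n with
  | none => []
  | some v => if 0 < v then pvB_outer 1 0 v else []

def generator_names_alt (n : Option Int) (names : Option (List String)) : List String :=
  match names with
  | some l => if l.isEmpty then pvB_elif n else l
  | none => pvB_elif n

-- ===== PRECONDITION & SPEC =====
-- Pre_ excludes exactly the inputs where both Pythons raise TypeError:
-- names falsy (None or []) together with n = None (`None > 0` is a TypeError).
def Pre_generator_names (n : Option Int) (names : Option (List String)) : Prop :=
  names.getD [] ≠ [] ∨ n ≠ none
instance (n : Option Int) (names : Option (List String)) : Decidable (Pre_generator_names n names) := by unfold Pre_generator_names; infer_instance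

def pvWitness_generator_names : Option Int × Option (List String) := (some 30, none)

def Spec_generator_names (n : Option Int) (names : Option (List String)) (out : List String) : Prop := out = generator_names_alt n names
instance (n : Option Int) (names : Option (List String)) (out : List String) : Decidable (Spec_generator_names n names out) := by unfold Spec_generator_names; infer_instance

-- ===== CLAIM (what is proved, stated in full; the proofs are below) =====
def Claim_equal_generator_names : Prop := ∀ (n : Option Int) (names : Option (List String)), Dom_generator_names n names → Pre_generator_names n names → Spec_generator_names n names (generator_names n names)

-- ===== LEMMAS AND PROOFS =====

-- the k-th generated name: letter k % 26, repeated k // 26 + 1 times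
def pvG (k : Int) : String :=
  String.ofList (List.replicate ((PySem.Int.floordiv k 26).toNat + 1)
    (pvAsciiLower.getD (PySem.Int.mod k 26).toNat 'a'))

theorem pvLower_length : pvAsciiLower.length = 26 := by decide

theorem foldl_append_const {α : Type} (c : α) (l : List Int) (acc : List α) :
    l.foldl (fun name _ => name ++ [c]) acc = acc ++ List.replicate l.length c := by
  induction l generalizing acc with
  | nil => simp
  | cons x xs ih =>
    rw [List.foldl_cons, ih]
    simp [List.replicate_succ]

theorem pvA_name_eq (k : Int) (hk : 0 ≤ k) : pvA_name k = pvG k := by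
  have h26 : ((pvAsciiLower.length : Nat) : Int) = 26 := by rw [pvLower_length]; norm_num
  have hfd : PySem.Int.floordiv k 26 = k / 26 := PySem.Int.floordiv_eq_ediv_of_pos (by omega)
  have hmd : PySem.Int.mod k 26 = k % 26 := PySem.Int.mod_eq_emod_of_pos (by omega)
  have hmlo : 0 ≤ k % 26 := Int.emod_nonneg k (by norm_num)
  have hmhi : k % 26 < 26 := Int.emod_lt_of_pos k (by norm_num)
  have hdv : 0 ≤ k / 26 := Int.ediv_nonneg hk (by norm_num)
  unfold pvA_name pvG
  rw [h26, hfd, hmd, foldl_append_const, PySem.List.length_pyRange_one]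
  have hL : (k / 26 + 1 - 0).toNat = (k / 26).toNat + 1 := by omega
  have hch : PySem.List.pyGetD pvAsciiLower (k % 26) 'a'
      = pvAsciiLower.getD (k % 26).toNat 'a' := by
    rw [PySem.List.pyGetD_eq_getElem pvAsciiLower 'a' hmlo (by rw [pvLower_length]; omega)]
    rw [List.getD_eq_getElem _ _ (by rw [pvLower_length]; omega)]
  rw [hL, hch]
  simp

theorem inner_spec (letters : List Char) (p len : Nat) (count n : Int)
    (hlet : letters = pvAsciiLower.drop p) (hlen : 1 ≤ len)
    (hcount : count = 26 * ((len : Int) - 1) + p) (hcn : count < n) :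
    pvB_inner letters count n len =
      ((PySem.List.pyRange count (min n (count + letters.length)) 1).map pvG,
        min n (count + letters.length)) := by
  induction letters generalizing p count with
  | nil =>
    simp only [pvB_inner, List.length_nil]
    have hm : min n (count + ((0 : Nat) : Int)) = count := by push_cast; omega
    rw [hm, PySem.List.pyRange_one_eq_nil (le_refl count)]
    simp
  | cons c rest ih =>
    have hp : p < pvAsciiLower.length := by
      by_contra h
      rw [List.drop_eq_nil_of_le (by omega)] at hlet
      exact List.cons_ne_nil _ _ hlet
    rw [List.drop_eq_getElem_cons hp] at hlet
    obtain ⟨hc, hrest⟩ : c = pvAsciiLower[p] ∧ rest = pvAsciiLower.drop (p + 1) := by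
      injection hlet.symm with h1 h2; exact ⟨h1.symm, h2.symm⟩
    have hy : String.ofList (List.replicate len c) = pvG count := by
      have hfd : PySem.Int.floordiv count 26 = (len : Int) - 1 := by
        rw [PySem.Int.floordiv_eq_ediv_of_pos (by omega)]
        rw [pvLower_length] at hp
        omega
      have hmd : PySem.Int.mod count 26 = (p : Int) := by
        rw [PySem.Int.mod_eq_emod_of_pos (by omega)]
        rw [pvLower_length] at hp
        omega
      unfold pvG
      rw [hfd, hmd, Int.toNat_natCast]
      rw [List.getD_eq_getElem _ _ hp]
      congr 1
      rw [← hc]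
      congr 1
      omega
    simp only [pvB_inner]
    split
    · -- break: n ≤ count + 1, so n = count + 1
      have hn : n = count + 1 := by omega
      have hm : min n (count + ((c :: rest).length : Nat)) = count + 1 := by
        simp only [List.length_cons]
        omega
      rw [hm]
      rw [PySem.List.pyRange_one_cons (by omega), PySem.List.pyRange_one_eq_nil (by omega)]
      simp [hy]
    · -- continue
      have hrec := ih (p + 1) (count + 1) hrest (by push_cast; omega) (by omega)
      have hm : min n (count + ((c :: rest).length : Nat)) = min n (count + 1 + (rest.length : Nat)) := by
        simp only [List.length_cons]
        omega
      have hlt : count < min n (count + 1 + (rest.length : Nat)) := by omega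
      rw [hrec, hm]
      rw [PySem.List.pyRange_one_cons hlt]
      simp [hy]

theorem outer_spec (len : Nat) (count n : Int) (hlen : 1 ≤ len)
    (hcount : count = 26 * ((len : Int) - 1)) :
    pvB_outer len count n = (PySem.List.pyRange count n 1).map pvG := by
  rw [pvB_outer.eq_def]
  split_ifs with h
  · have hi := inner_spec pvAsciiLower 0 len count n (by simp) hlen (by omega) h
    rw [pvLower_length] at hi
    push_cast at hi
    by_cases hm : count + 26 ≤ n
    · have hmin : min n (count + 26) = count + 26 := by omega
      have hrec := outer_spec (len + 1) (count + 26) n (by omega) (by push_cast; omega)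
      simp only [hi, hmin, hrec]
      rw [← List.map_append, ← PySem.List.pyRange_one_append count (count + 26) n (by omega) (by omega)]
    · have hmin : min n (count + 26) = n := by omega
      simp only [hi, hmin]
      rw [pvB_outer.eq_def, dif_neg (by omega)]
      simp
  · rw [PySem.List.pyRange_one_eq_nil (by omega)]
    simp
termination_by (n - count).toNat
decreasing_by omega

theorem elif_eq (n : Option Int) : pvA_elif n = pvB_elif n := by
  cases n with
  | none => rfl
  | some v =>
    simp only [pvA_elif, pvB_elif]
    split_ifs with h
    · rw [outer_spec 1 0 v (by omega) (by norm_num)]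
      apply List.map_congr_left
      intro k hk
      rw [PySem.List.mem_pyRange_one] at hk
      exact pvA_name_eq k (by omega)
    · rfl

-- ===== VERDICT (by name: the statement is the Claim_ definition above) =====
theorem generator_names_spec : Claim_equal_generator_names := by
  intro n names _ _
  unfold Spec_generator_names generator_names generator_names_alt
  cases names with
  | none => exact elif_eq n
  | some l =>
    dsimp only
    split_ifs
    · exact elif_eq n
    · rfl
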